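-- pv_equiv track=rewrite | github.com/o0XDuser0o/OOD | practice/forExam2/mydemon.py | deleteisland
-- ===== SOURCE A (Python) =====
-- def deleteisland(mylist,y,x):
--     if y < 0 or y >= len(mylist) or x < 0 or x >= len(mylist[0]) or mylist[y][x] == ".":
--         return mylist
--     mylist[y][x] = "."
--     mylist= deleteisland(mylist,y-1,x)
--     mylist= deleteisland(mylist,y,x+1)
--     mylist= deleteisland(mylist,y+1,x)
--     mylist= deleteisland(mylist,y,x-1)
--     return mylist
-- ===== SOURCE B (Python) =====
-- def deleteisland(mylist, y, x):
--     h = len(mylist)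
--     w = len(mylist[0]) if mylist else 0
--     stack = [(y, x)]
--     while stack:
--         cy, cx = stack.pop()
--         if 0 <= cy < h and 0 <= cx < w and mylist[cy][cx] != ".":
--             mylist[cy][cx] = "."
--             stack += [(cy, cx - 1), (cy + 1, cx), (cy, cx + 1), (cy - 1, cx)]
--     return mylist
-- ===== Notes on version B (the rewrite author's own statement) =====
-- stated objective: alternative
-- what changed: Replaces the 4-way recursive flood fill with an iterative worklist loop that precomputes the grid dimensions once and pops coordinates off an explicit stack, re-checking an inverted in-bounds/non-'.' condition at pop time, so recursion (and its depth limit) disappears entirely.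
-- outside the precondition, e.g. on deleteisland([['#'], ['#', '#']], 0, 0): A returns [['.'], ['.', '#']], B returns [['.'], ['.', '#']]
import Mathlib
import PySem

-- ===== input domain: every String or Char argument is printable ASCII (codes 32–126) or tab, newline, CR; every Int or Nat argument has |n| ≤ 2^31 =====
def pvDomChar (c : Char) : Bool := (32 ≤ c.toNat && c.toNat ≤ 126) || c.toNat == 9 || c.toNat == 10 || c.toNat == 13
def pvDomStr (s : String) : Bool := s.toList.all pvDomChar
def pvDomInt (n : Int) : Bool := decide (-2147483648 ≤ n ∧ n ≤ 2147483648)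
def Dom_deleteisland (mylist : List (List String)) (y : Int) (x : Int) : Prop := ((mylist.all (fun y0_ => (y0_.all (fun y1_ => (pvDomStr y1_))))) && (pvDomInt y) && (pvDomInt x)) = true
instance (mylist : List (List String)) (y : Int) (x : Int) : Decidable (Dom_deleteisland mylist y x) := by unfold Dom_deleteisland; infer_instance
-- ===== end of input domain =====

-- B replaces A's 4-way recursive flood fill by an iterative worklist loop that precomputes the
-- bounds once and re-checks the (equivalent) guard at pop time; both mutate the grid in place in
-- Python — the equivalence proved here is about the returned value. Ports are made total with a
-- fuel argument that provably suffices on Pre_.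

-- ===== PORT A =====
def pvMu (g : List (List String)) : Nat :=
  (g.map (fun r => r.countP (fun s => !(s == ".")))).sum

def pvGuard (g : List (List String)) (y x : Int) : Bool :=
  decide (y < 0) || decide ((g.length : Int) ≤ y) || decide (x < 0) ||
    decide (((g.headD []).length : Int) ≤ x) || ((g.getD y.toNat []).getD x.toNat "" == ".")

def pvMark (g : List (List String)) (y x : Int) : List (List String) :=
  g.set y.toNat ((g.getD y.toNat []).set x.toNat ".")

def pvRecA : Nat → List (List String) → Int → Int → List (List String)
  | 0, g, _, _ => g
  | f + 1, g, y, x =>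
    if pvGuard g y x then g
    else
      let g1 := pvMark g y x
      let g2 := pvRecA f g1 (y - 1) x
      let g3 := pvRecA f g2 y (x + 1)
      let g4 := pvRecA f g3 (y + 1) x
      pvRecA f g4 y (x - 1)

def deleteisland (mylist : List (List String)) (y : Int) (x : Int) : List (List String) :=
  pvRecA (pvMu mylist + 1) mylist y x

-- ===== PORT B =====
-- total number of cells: a fuel bound for the worklist loop (each iteration pops one entry and
-- pushes four only when it turns a non-'.' cell into '.')
def pvCells (g : List (List String)) : Nat := (g.map List.length).sum

def pvFill (h w : Int) : Nat → List (List String) → List (Int × Int) → List (List String)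
  | _, g, [] => g
  | 0, g, _ :: _ => g
  | f + 1, g, (cy, cx) :: rest =>
    if 0 ≤ cy ∧ cy < h ∧ 0 ≤ cx ∧ cx < w ∧ (g.getD cy.toNat []).getD cx.toNat "" ≠ "." then
      pvFill h w f (g.modify cy.toNat (fun r => r.modify cx.toNat (fun _ => ".")))
        ((cy - 1, cx) :: (cy, cx + 1) :: (cy + 1, cx) :: (cy, cx - 1) :: rest)
    else
      pvFill h w f g rest

def deleteisland_alt (mylist : List (List String)) (y : Int) (x : Int) : List (List String) :=
  pvFill (mylist.length : Int)
    (if mylist.isEmpty then (0 : Int) else ((mylist.headD []).length : Int))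
    (5 * pvCells mylist + 1) mylist [(y, x)]

-- ===== PRECONDITION & SPEC =====
-- Pre_ excludes ragged (non-rectangular) grids except when the start returns immediately: on a
-- ragged grid whose flood fill reaches a row shorter than row 0, A raises IndexError; this
-- closed-form over-approximation also drops some ragged inputs on which A happens to return
-- (cited in claim.json), where B returns the same value.
def Pre_deleteisland (mylist : List (List String)) (y : Int) (x : Int) : Prop :=
  (∀ r ∈ mylist, r.length = (mylist.headD []).length) ∨ y < 0 ∨ (mylist.length : Int) ≤ y ∨
    x < 0 ∨ ((mylist.headD []).length : Int) ≤ x ∨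
    (mylist.getD y.toNat []).getD x.toNat "" = "."
instance (mylist : List (List String)) (y : Int) (x : Int) : Decidable (Pre_deleteisland mylist y x) := by unfold Pre_deleteisland; infer_instance

def pvWitness_deleteisland : List (List String) × Int × Int := ([["#", "#"], [".", "#"]], 0, 0)

def Spec_deleteisland (mylist : List (List String)) (y : Int) (x : Int) (out : List (List String)) : Prop := out = deleteisland_alt mylist y x
instance (mylist : List (List String)) (y : Int) (x : Int) (out : List (List String)) : Decidable (Spec_deleteisland mylist y x out) := by unfold Spec_deleteisland; infer_instance

-- ===== CLAIM (what is proved, stated in full; the proofs are below) =====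
def Claim_equal_deleteisland : Prop := ∀ (mylist : List (List String)) (y : Int) (x : Int), Dom_deleteisland mylist y x → Pre_deleteisland mylist y x → Spec_deleteisland mylist y x (deleteisland mylist y x)

-- ===== LEMMAS AND PROOFS =====

-- proof-side reference loop: A's guard/mark vocabulary in worklist form; B's port is proved equal
-- to it (pv_fill_eq_loopB) and it is proved equal to A's recursion (pv_sim)
def pvLoopB : Nat → List (List String) → List (Int × Int) → List (List String)
  | _, g, [] => g
  | 0, g, _ :: _ => g
  | f + 1, g, (y, x) :: s =>
    if pvGuard g y x then pvLoopB f g s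
    else pvLoopB f (pvMark g y x) ((y - 1, x) :: (y, x + 1) :: (y + 1, x) :: (y, x - 1) :: s)

-- rectangularity with an explicit width
def pvR (c : Nat) (g : List (List String)) : Prop := ∀ r ∈ g, r.length = c

-- generic counting lemmas
theorem pv_countP_set_le {α : Type} (p : α → Bool) (l : List α) (i : Nat) (v : α)
    (hv : p v = false) : (l.set i v).countP p ≤ l.countP p := by
  induction l generalizing i with
  | nil => simp
  | cons a t ih =>
    cases i with
    | zero => simp [List.countP_cons, hv]
    | succ j => simp only [List.set_cons_succ, List.countP_cons]; have := ih j; omega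

theorem pv_countP_set_eq {α : Type} (p : α → Bool) (l : List α) (i : Nat) (v : α)
    (h : i < l.length) (hpi : p l[i] = true) (hv : p v = false) :
    (l.set i v).countP p + 1 = l.countP p := by
  induction l generalizing i with
  | nil => simp at h
  | cons a t ih =>
    cases i with
    | zero => simp at hpi; simp [hv, hpi]
    | succ j =>
      simp at hpi h
      simp only [List.set_cons_succ, List.countP_cons]
      have := ih j h hpi; omega

theorem pv_guard_false {g : List (List String)} {y x : Int} (h : pvGuard g y x = false) :
    0 ≤ y ∧ y.toNat < g.length ∧ 0 ≤ x ∧ x.toNat < (g.headD []).length ∧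
      ¬ (g.getD y.toNat []).getD x.toNat "" = "." := by
  simp [pvGuard] at h
  obtain ⟨⟨⟨⟨ha, hb⟩, hc⟩, hd⟩, he⟩ := h
  rw [show (g.headD []) = g.head?.getD [] from List.headD_eq_head?_getD]
  refine ⟨ha, by omega, hc, by omega, ?_⟩
  simpa [List.getD_eq_getElem?_getD] using he

theorem pv_sum_map_set {α : Type} (f : α → Nat) (l : List α) (i : Nat) (v : α)
    (h : i < l.length) : ((l.set i v).map f).sum + f l[i] = (l.map f).sum + f v := by
  induction l generalizing i with
  | nil => simp at h
  | cons a t ih =>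
    cases i with
    | zero => simp; omega
    | succ j =>
      simp only [List.length_cons] at h
      simp only [List.set_cons_succ, List.map_cons, List.sum_cons, List.getElem_cons_succ]
      have := ih j (by omega); omega

theorem pv_R_mark {c : Nat} {g : List (List String)} (hR : pvR c g) (y x : Int) :
    pvR c (pvMark g y x) := by
  intro r hr
  by_cases hy : y.toNat < g.length
  · rcases List.mem_or_eq_of_mem_set hr with h | h
    · exact hR r h
    · subst h
      rw [List.length_set, List.getD_eq_getElem g [] hy]
      exact hR _ (List.getElem_mem hy)
  · rw [pvMark, List.set_eq_of_length_le (by omega)] at hr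
    exact hR r hr

theorem pv_mu_mark_le (g : List (List String)) (y x : Int) :
    pvMu (pvMark g y x) ≤ pvMu g := by
  by_cases hy : y.toNat < g.length
  · have h1 := pv_sum_map_set (fun r => r.countP (fun s => !(s == "."))) g y.toNat
      ((g.getD y.toNat []).set x.toNat ".") hy
    have h2 : ((g.getD y.toNat []).set x.toNat ".").countP (fun s => !(s == ".")) ≤
        (g.getD y.toNat []).countP (fun s => !(s == ".")) := by
      apply pv_countP_set_le; simp
    have hrow := List.getD_eq_getElem g [] hy
    simp only [pvMu, pvMark, hrow] at h1 h2 ⊢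
    omega
  · rw [pvMark, List.set_eq_of_length_le (by omega)]

theorem pv_mu_mark {c : Nat} {g : List (List String)} {y x : Int} (hR : pvR c g)
    (h : pvGuard g y x = false) : pvMu (pvMark g y x) + 1 = pvMu g := by
  obtain ⟨hy0, hy, hx0, hx, hc⟩ := pv_guard_false h
  have hrow : (g.getD y.toNat []) = g[y.toNat] := List.getD_eq_getElem g [] hy
  have hhead : (g.headD []).length = c := by
    have : g.headD [] ∈ g := by
      cases g with
      | nil => simp at hy
      | cons a t => simp
    exact hR _ this
  have hlen : x.toNat < (g[y.toNat] : List String).length := by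
    rw [hR _ (List.getElem_mem hy)]; omega
  have h2 : ((g.getD y.toNat []).set x.toNat ".").countP (fun s => !(s == ".")) + 1 =
      (g.getD y.toNat []).countP (fun s => !(s == ".")) := by
    rw [hrow]
    apply pv_countP_set_eq _ _ _ _ hlen
    · rw [hrow, List.getD_eq_getElem?_getD, List.getElem?_eq_getElem hlen] at hc
      simp at hc; simp [hc]
    · simp
  have h1 := pv_sum_map_set (fun r => r.countP (fun s => !(s == "."))) g y.toNat
      ((g.getD y.toNat []).set x.toNat ".") hy
  simp only [pvMu, pvMark, hrow] at h1 h2 ⊢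
  omega

theorem pv_mu_pos {c : Nat} {g : List (List String)} {y x : Int} (hR : pvR c g)
    (h : pvGuard g y x = false) : 1 ≤ pvMu g := by
  have := pv_mu_mark hR h; omega

theorem pv_guard_of_mu_zero {c : Nat} {g : List (List String)} (hR : pvR c g)
    (hμ : pvMu g = 0) (y x : Int) : pvGuard g y x = true := by
  by_contra hfalse
  have : pvGuard g y x = false := by
    cases hg : pvGuard g y x with
    | false => rfl
    | true => exact absurd hg hfalse
  have := pv_mu_pos hR this; omega

def pvRA (g : List (List String)) (y x : Int) : List (List String) :=
  pvRecA (pvMu g + 1) g y x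

def pvLB (g : List (List String)) (s : List (Int × Int)) : List (List String) :=
  pvLoopB (5 * pvMu g + s.length) g s

theorem pv_R_recA {c : Nat} (f : Nat) : ∀ (g : List (List String)) (y x : Int), pvR c g →
    pvR c (pvRecA f g y x) := by
  induction f with
  | zero => intro g y x h; simpa [pvRecA] using h
  | succ f ih =>
    intro g y x h
    rw [pvRecA]
    split
    · exact h
    · exact ih _ _ _ (ih _ _ _ (ih _ _ _ (ih _ _ _ (pv_R_mark h y x))))

theorem pv_mu_recA_le (f : Nat) : ∀ (g : List (List String)) (y x : Int),
    pvMu (pvRecA f g y x) ≤ pvMu g := by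
  induction f with
  | zero => intro g y x; simp [pvRecA]
  | succ f ih =>
    intro g y x
    rw [pvRecA]
    split
    · omega
    · have h0 := pv_mu_mark_le g y x
      have h1 := ih (pvMark g y x) (y - 1) x
      have h2 := ih (pvRecA f (pvMark g y x) (y - 1) x) y (x + 1)
      have h3 := ih (pvRecA f (pvRecA f (pvMark g y x) (y - 1) x) y (x + 1)) (y + 1) x
      have h4 := ih (pvRecA f (pvRecA f (pvRecA f (pvMark g y x) (y - 1) x) y (x + 1)) (y + 1) x) y (x - 1)
      simp only
      omega

theorem pv_recA_fuel {c : Nat} : ∀ (k : Nat) (g : List (List String)) (y x : Int) (f₁ f₂ : Nat),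
    pvR c g → pvMu g ≤ k → pvMu g < f₁ → pvMu g < f₂ →
    pvRecA f₁ g y x = pvRecA f₂ g y x := by
  intro k
  induction k with
  | zero =>
    intro g y x f₁ f₂ hR hμ h1 h2
    obtain ⟨a, ha⟩ : ∃ a, f₁ = a + 1 := ⟨f₁ - 1, by omega⟩
    obtain ⟨b, hb⟩ : ∃ b, f₂ = b + 1 := ⟨f₂ - 1, by omega⟩
    subst ha hb
    rw [pvRecA, pvRecA, pv_guard_of_mu_zero hR (by omega) y x]
    simp
  | succ k ih =>
    intro g y x f₁ f₂ hR hμ h1 h2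
    obtain ⟨a, ha⟩ : ∃ a, f₁ = a + 1 := ⟨f₁ - 1, by omega⟩
    obtain ⟨b, hb⟩ : ∃ b, f₂ = b + 1 := ⟨f₂ - 1, by omega⟩
    subst ha hb
    rw [pvRecA, pvRecA]
    cases hg : pvGuard g y x with
    | true => simp
    | false =>
      simp only [Bool.false_eq_true, if_false]
      have hμm := pv_mu_mark hR hg
      have hR1 := pv_R_mark hR y x
      set g1 := pvMark g y x with hg1
      have e2 : pvRecA a g1 (y - 1) x = pvRecA b g1 (y - 1) x :=
        ih g1 _ _ _ _ hR1 (by omega) (by omega) (by omega)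
      rw [e2]
      set g2 := pvRecA b g1 (y - 1) x with hgg2
      have hR2 : pvR c g2 := pv_R_recA _ _ _ _ hR1
      have hμ2 : pvMu g2 ≤ pvMu g1 := pv_mu_recA_le _ _ _ _
      have e3 : pvRecA a g2 y (x + 1) = pvRecA b g2 y (x + 1) :=
        ih g2 _ _ _ _ hR2 (by omega) (by omega) (by omega)
      rw [e3]
      set g3 := pvRecA b g2 y (x + 1) with hgg3
      have hR3 : pvR c g3 := pv_R_recA _ _ _ _ hR2
      have hμ3 : pvMu g3 ≤ pvMu g2 := pv_mu_recA_le _ _ _ _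
      have e4 : pvRecA a g3 (y + 1) x = pvRecA b g3 (y + 1) x :=
        ih g3 _ _ _ _ hR3 (by omega) (by omega) (by omega)
      rw [e4]
      set g4 := pvRecA b g3 (y + 1) x with hgg4
      have hR4 : pvR c g4 := pv_R_recA _ _ _ _ hR3
      have hμ4 : pvMu g4 ≤ pvMu g3 := pv_mu_recA_le _ _ _ _
      exact ih g4 _ _ _ _ hR4 (by omega) (by omega) (by omega)

theorem pv_loopB_fuel {c : Nat} : ∀ (k : Nat) (g : List (List String)) (s : List (Int × Int))
    (f₁ f₂ : Nat), pvR c g → 5 * pvMu g + s.length ≤ k →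
    5 * pvMu g + s.length ≤ f₁ → 5 * pvMu g + s.length ≤ f₂ →
    pvLoopB f₁ g s = pvLoopB f₂ g s := by
  intro k
  induction k with
  | zero =>
    intro g s f₁ f₂ hR hk h1 h2
    have hs : s = [] := by cases s <;> simp_all
    subst hs
    cases f₁ <;> cases f₂ <;> rfl
  | succ k ih =>
    intro g s f₁ f₂ hR hk h1 h2
    cases s with
    | nil => cases f₁ <;> cases f₂ <;> rfl
    | cons p t =>
      obtain ⟨py, px⟩ := p
      obtain ⟨a, ha⟩ : ∃ a, f₁ = a + 1 := ⟨f₁ - 1, by simp at h1; omega⟩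
      obtain ⟨b, hb⟩ : ∃ b, f₂ = b + 1 := ⟨f₂ - 1, by simp at h2; omega⟩
      subst ha hb
      simp only [List.length_cons] at hk h1 h2
      rw [pvLoopB, pvLoopB]
      cases hg : pvGuard g py px with
      | true =>
        simp only [if_true]
        exact ih g t a b hR (by omega) (by omega) (by omega)
      | false =>
        simp only [Bool.false_eq_true, if_false]
        have hμm := pv_mu_mark hR hg
        exact ih (pvMark g py px) _ a b (pv_R_mark hR py px)
          (by simp; omega) (by simp; omega) (by simp; omega)

theorem pv_sim {c : Nat} : ∀ (k : Nat) (g : List (List String)) (y x : Int)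
    (s : List (Int × Int)), pvR c g → pvMu g ≤ k →
    pvLB g ((y, x) :: s) = pvLB (pvRA g y x) s := by
  intro k
  induction k with
  | zero =>
    intro g y x s hR hμ
    have hg := pv_guard_of_mu_zero hR (by omega) y x
    have h1 : pvLB g ((y, x) :: s) = pvLB g s := by
      simp only [pvLB, List.length_cons]
      rw [show 5 * pvMu g + (s.length + 1) = (5 * pvMu g + s.length) + 1 from by omega]
      rw [pvLoopB, hg]; simp
    have h2 : pvRA g y x = g := by
      rw [pvRA, pvRecA, hg]; simp
    rw [h1, h2]
  | succ k ih =>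
    intro g y x s hR hμ
    cases hg : pvGuard g y x with
    | true =>
      have h1 : pvLB g ((y, x) :: s) = pvLB g s := by
        simp only [pvLB, List.length_cons]
        rw [show 5 * pvMu g + (s.length + 1) = (5 * pvMu g + s.length) + 1 from by omega]
        rw [pvLoopB, hg]; simp
      have h2 : pvRA g y x = g := by
        rw [pvRA, pvRecA, hg]; simp
      rw [h1, h2]
    | false =>
      have hμm := pv_mu_mark hR hg
      have hR1 := pv_R_mark hR y x
      set g1 := pvMark g y x with hg1
      have hL : pvLB g ((y, x) :: s) =
          pvLB g1 ((y - 1, x) :: (y, x + 1) :: (y + 1, x) :: (y, x - 1) :: s) := by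
        simp only [pvLB, List.length_cons]
        rw [show 5 * pvMu g + (s.length + 1) = (5 * pvMu g + s.length) + 1 from by omega]
        rw [pvLoopB, hg]
        simp only [Bool.false_eq_true, if_false]
        exact pv_loopB_fuel (c := c) (5 * pvMu g + s.length) g1 _ _ _ hR1
          (by simp only [List.length_cons]; omega) (by simp only [List.length_cons]; omega)
          (by simp only [List.length_cons]; omega)
      have hRA : pvRA g y x =
          pvRA (pvRA (pvRA (pvRA g1 (y - 1) x) y (x + 1)) (y + 1) x) y (x - 1) := by
        rw [pvRA, show pvMu g + 1 = (pvMu g) + 1 from rfl, pvRecA, hg]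
        simp only [Bool.false_eq_true, if_false]
        have e1 : pvRecA (pvMu g) g1 (y - 1) x = pvRA g1 (y - 1) x :=
          pv_recA_fuel (c := c) (pvMu g1) g1 _ _ _ _ hR1 (by omega) (by omega) (by omega)
        rw [e1]
        set g2 := pvRA g1 (y - 1) x with hgg2
        have hR2 : pvR c g2 := pv_R_recA _ _ _ _ hR1
        have hμ2 : pvMu g2 ≤ pvMu g1 := pv_mu_recA_le _ _ _ _
        have e2 : pvRecA (pvMu g) g2 y (x + 1) = pvRA g2 y (x + 1) :=
          pv_recA_fuel (c := c) (pvMu g2) g2 _ _ _ _ hR2 (by omega) (by omega) (by omega)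
        rw [e2]
        set g3 := pvRA g2 y (x + 1) with hgg3
        have hR3 : pvR c g3 := pv_R_recA _ _ _ _ hR2
        have hμ3 : pvMu g3 ≤ pvMu g2 := pv_mu_recA_le _ _ _ _
        have e3 : pvRecA (pvMu g) g3 (y + 1) x = pvRA g3 (y + 1) x :=
          pv_recA_fuel (c := c) (pvMu g3) g3 _ _ _ _ hR3 (by omega) (by omega) (by omega)
        rw [e3]
        set g4 := pvRA g3 (y + 1) x with hgg4
        have hR4 : pvR c g4 := pv_R_recA _ _ _ _ hR3
        have hμ4 : pvMu g4 ≤ pvMu g3 := pv_mu_recA_le _ _ _ _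
        exact pv_recA_fuel (c := c) (pvMu g4) g4 _ _ _ _ hR4 (by omega) (by omega) (by omega)
      rw [hL, hRA]
      have hμ1 : pvMu g1 ≤ k := by omega
      set g2 := pvRA g1 (y - 1) x with hgg2
      have hR2 : pvR c g2 := pv_R_recA _ _ _ _ hR1
      have hμ2 : pvMu g2 ≤ pvMu g1 := pv_mu_recA_le _ _ _ _
      set g3 := pvRA g2 y (x + 1) with hgg3
      have hR3 : pvR c g3 := pv_R_recA _ _ _ _ hR2
      have hμ3 : pvMu g3 ≤ pvMu g2 := pv_mu_recA_le _ _ _ _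
      set g4 := pvRA g3 (y + 1) x with hgg4
      have hR4 : pvR c g4 := pv_R_recA _ _ _ _ hR3
      have hμ4 : pvMu g4 ≤ pvMu g3 := pv_mu_recA_le _ _ _ _
      rw [ih g1 (y - 1) x _ hR1 hμ1, ← hgg2,
          ih g2 y (x + 1) _ hR2 (by omega), ← hgg3,
          ih g3 (y + 1) x _ hR3 (by omega), ← hgg4,
          ih g4 y (x - 1) _ hR4 (by omega)]

theorem pv_loopB_nil (f : Nat) (g : List (List String)) : pvLoopB f g [] = g := by
  cases f <;> rfl

theorem pv_final (g : List (List String)) (y x : Int) (hPre : Pre_deleteisland g y x) :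
    pvRecA (pvMu g + 1) g y x = pvLoopB (5 * pvMu g + 1) g [(y, x)] := by
  cases hg : pvGuard g y x with
  | true =>
    rw [pvRecA, hg]
    rw [show 5 * pvMu g + 1 = (5 * pvMu g) + 1 from rfl, pvLoopB, hg]
    simp [pv_loopB_nil]
  | false =>
    have hgf := pv_guard_false hg
    have hR : pvR (g.headD []).length g := by
      rcases hPre with h | h | h | h | h | h
      · exact h
      · omega
      · omega
      · omega
      · omega
      · exact absurd h hgf.2.2.2.2
    have := pv_sim (c := (g.headD []).length) (pvMu g) g y x [] hR (le_refl _)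
    simp only [pvLB, List.length_cons, List.length_nil] at this
    rw [show 5 * pvMu g + (0 + 1) = 5 * pvMu g + 1 from by omega] at this
    rw [this, pvRA, pv_loopB_nil]

-- ===== bridging B's port to the reference loop =====

-- B's pop-time condition is exactly the negation of A's guard once h and w are the dimensions
theorem pv_cond_iff (g : List (List String)) (cy cx : Int) :
    (0 ≤ cy ∧ cy < (g.length : Int) ∧ 0 ≤ cx ∧ cx < ((g.headD []).length : Int) ∧
      (g.getD cy.toNat []).getD cx.toNat "" ≠ ".") ↔ pvGuard g cy cx = false := by
  simp [pvGuard]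
  constructor
  · rintro ⟨h1, h2, h3, h4, h5⟩
    exact ⟨⟨⟨⟨by omega, by omega⟩, by omega⟩, by omega⟩, h5⟩
  · rintro ⟨⟨⟨⟨h1, h2⟩, h3⟩, h4⟩, h5⟩
    exact ⟨by omega, by omega, by omega, by omega, h5⟩

theorem pv_modify_const {α : Type} (l : List α) (i : Nat) (v : α) :
    l.modify i (fun _ => v) = l.set i v := (List.set_eq_modify v i l).symm

theorem pv_mark_modify (g : List (List String)) (y x : Int) :
    g.modify y.toNat (fun r => r.modify x.toNat (fun _ => ".")) = pvMark g y x := by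
  have hin : ∀ r : List String, r.modify x.toNat (fun _ => ".") = r.set x.toNat "." :=
    fun r => pv_modify_const r x.toNat "."
  simp only [hin]
  by_cases hy : y.toNat < g.length
  · rw [List.modify_eq_set_get _ hy, pvMark, List.getD_eq_getElem g [] hy]
    simp [List.get_eq_getElem]
  · rw [List.modify_eq_set_getElem?, List.getElem?_eq_none (by omega), pvMark,
        List.set_eq_of_length_le (by omega)]
    rfl

theorem pv_headD_len_mark (g : List (List String)) (y x : Int) :
    ((pvMark g y x).headD []).length = (g.headD []).length := by
  cases g with
  | nil => simp [pvMark]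
  | cons a t =>
    cases hy : y.toNat with
    | zero => simp [pvMark, hy]
    | succ n => simp [pvMark, hy]

theorem pv_len_mark (g : List (List String)) (y x : Int) :
    (pvMark g y x).length = g.length := by
  simp [pvMark]

theorem pv_fill_eq_loopB : ∀ (f : Nat) (g : List (List String)) (s : List (Int × Int))
    (h w : Int), h = (g.length : Int) → w = ((g.headD []).length : Int) →
    pvFill h w f g s = pvLoopB f g s := by
  intro f
  induction f with
  | zero =>
    intro g s h w _ _
    cases s <;> rfl
  | succ f ih =>
    intro g s h w hh hw
    cases s with
    | nil => rfl
    | cons p t =>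
      obtain ⟨cy, cx⟩ := p
      rw [pvFill, pvLoopB]
      subst hh hw
      by_cases hc : 0 ≤ cy ∧ cy < (g.length : Int) ∧ 0 ≤ cx ∧
          cx < ((g.headD []).length : Int) ∧ (g.getD cy.toNat []).getD cx.toNat "" ≠ "." 
      · have hg : pvGuard g cy cx = false := (pv_cond_iff g cy cx).mp hc
        rw [if_pos hc, hg]
        simp only [Bool.false_eq_true, if_false]
        rw [pv_mark_modify]
        exact ih _ _ _ _ (by rw [pv_len_mark]) (by rw [pv_headD_len_mark])
      · have hg : pvGuard g cy cx = true := by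
          cases hgv : pvGuard g cy cx with
          | false => exact absurd ((pv_cond_iff g cy cx).mpr hgv) hc
          | true => rfl
        rw [if_neg hc, hg]
        simp only [if_true]
        exact ih _ _ _ _ rfl rfl

theorem pv_mu_le_cells (g : List (List String)) : pvMu g ≤ pvCells g := by
  induction g with
  | nil => simp [pvMu, pvCells]
  | cons r t ih =>
    have h := List.countP_le_length (p := fun s => !(s == ".")) (l := r)
    simp only [pvMu, pvCells, List.map_cons, List.sum_cons] at ih ⊢
    omega

theorem pv_alt_w (g : List (List String)) :
    (if g.isEmpty then (0 : Int) else ((g.headD []).length : Int)) =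
      ((g.headD []).length : Int) := by
  cases g <;> simp

-- ===== VERDICT (by name: the statement is the Claim_ definition above) =====
theorem deleteisland_spec : Claim_equal_deleteisland := by
  intro g y x _ hPre
  unfold Spec_deleteisland deleteisland deleteisland_alt
  rw [pv_alt_w, pv_fill_eq_loopB _ _ _ _ _ rfl rfl, pv_final g y x hPre]
  cases hg : pvGuard g y x with
  | true =>
    have h1 : pvLoopB (5 * pvMu g + 1) g [(y, x)] = g := by
      rw [show 5 * pvMu g + 1 = (5 * pvMu g) + 1 from rfl, pvLoopB, hg]
      simp [pv_loopB_nil]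
    have h2 : pvLoopB (5 * pvCells g + 1) g [(y, x)] = g := by
      rw [show 5 * pvCells g + 1 = (5 * pvCells g) + 1 from rfl, pvLoopB, hg]
      simp [pv_loopB_nil]
    rw [h1, h2]
  | false =>
    have hgf := pv_guard_false hg
    have hR : pvR (g.headD []).length g := by
      rcases hPre with h | h | h | h | h | h
      · exact h
      · omega
      · omega
      · omega
      · omega
      · exact absurd h hgf.2.2.2.2
    have hμc := pv_mu_le_cells g
    exact (pv_loopB_fuel (c := (g.headD []).length) (5 * pvCells g + 1) g [(y, x)] _ _ hR
      (by simp only [List.length_cons, List.length_nil]; omega)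
      (by simp only [List.length_cons, List.length_nil]; omega)
      (by simp only [List.length_cons, List.length_nil]; omega)).symm
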